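-- pv_equiv track=rewrite | github.com/ClemenPine/amini | cmds/setfingermap.py | finger_value
-- ===== SOURCE A (Python) =====
-- def finger_value(finger):
--     replacements = {
--         '0': 'LP',
--         '1': 'LR',
--         '2': 'LM',
--         '3': 'LI',
--         '4': 'RI',
--         '5': 'RM',
--         '6': 'RR',
--         '7': 'RP',
--         '8': 'LT',
--         '9': 'RT'
--     }
--     for k, v in replacements.items():
--         finger = finger.replace(k, v)
--     return finger.strip()
-- ===== SOURCE B (Python) =====
-- def finger_value(finger):
--     codes = ['LP', 'LR', 'LM', 'LI', 'RI', 'RM', 'RR', 'RP', 'LT', 'RT']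
--     out = []
--     for c in finger:
--         if '0' <= c <= '9':
--             out.append(codes[ord(c) - ord('0')])
--         else:
--             out.append(c)
--     return ''.join(out).strip()
-- ===== Notes on version B (the rewrite author's own statement) =====
-- stated objective: idiomatic
-- what changed: Replaced ten sequential whole-string .replace passes over a dict with a single character pass that indexes a code table by the digit's ordinal value and joins, then strips once.
import Mathlib
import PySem

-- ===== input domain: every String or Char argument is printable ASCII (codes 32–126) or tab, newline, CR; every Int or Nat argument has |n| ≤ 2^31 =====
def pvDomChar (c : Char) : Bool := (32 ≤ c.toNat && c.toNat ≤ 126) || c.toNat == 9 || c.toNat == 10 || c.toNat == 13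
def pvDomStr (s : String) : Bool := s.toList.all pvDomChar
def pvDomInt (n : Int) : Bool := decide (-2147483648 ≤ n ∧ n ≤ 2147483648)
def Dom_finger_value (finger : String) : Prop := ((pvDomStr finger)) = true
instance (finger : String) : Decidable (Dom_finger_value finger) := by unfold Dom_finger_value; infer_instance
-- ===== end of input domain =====

-- B replaces A's ten sequential whole-string .replace passes over a dict with a single
-- character pass that indexes a code table by the digit's ordinal value, then strips once.

-- ===== PORT A =====
-- the digit → finger-code dictionary of A
def fvReplacements : PySem.Dict String String :=
  { items := [("0", "LP"), ("1", "LR"), ("2", "LM"), ("3", "LI"), ("4", "RI"),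
              ("5", "RM"), ("6", "RR"), ("7", "RP"), ("8", "LT"), ("9", "RT")] }

-- for k, v in replacements.items(): finger = finger.replace(k, v); return finger.strip()
def finger_value (finger : String) : String :=
  PySem.Str.strip
    (fvReplacements.items.foldl (fun f kv => PySem.Str.replace f kv.1 kv.2) finger)

-- ===== PORT B =====
-- codes = ['LP','LR','LM','LI','RI','RM','RR','RP','LT','RT'] (as character lists)
def fvCodes : List (List Char) :=
  [['L','P'], ['L','R'], ['L','M'], ['L','I'], ['R','I'],
   ['R','M'], ['R','R'], ['R','P'], ['L','T'], ['R','T']]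

-- the loop: for c in finger: append codes[ord(c)-ord('0')] if digit else c
def fvBuild : List Char → List Char
  | [] => []
  | c :: t =>
      (if '0' ≤ c ∧ c ≤ '9' then fvCodes.getD (c.toNat - '0'.toNat) [c] else [c]) ++ fvBuild t

-- return ''.join(out).strip()
def finger_value_alt (finger : String) : String :=
  String.ofList (PySem.Chars.strip (fvBuild finger.toList))

-- ===== PRECONDITION & SPEC =====
def Spec_finger_value (finger : String) (out : String) : Prop := out = finger_value_alt finger
instance (finger : String) (out : String) : Decidable (Spec_finger_value finger out) := by unfold Spec_finger_value; infer_instance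

-- ===== CLAIM (what is proved, stated in full; the proofs are below) =====
def Claim_equal_finger_value : Prop := ∀ (finger : String), Dom_finger_value finger → Spec_finger_value finger (finger_value finger)

-- ===== LEMMAS AND PROOFS =====

-- one replace step on a single character
def fvStep (k : Char) (new : List Char) (c : Char) : List Char := if c = k then new else [c]

-- single-char replace is a flatMap over the characters
theorem replace_go_single (k : Char) (new : List Char) :
    ∀ (fuel : Nat) (l acc : List Char), l.length ≤ fuel →
      PySem.Chars.replace.go [k] new fuel l acc =
        acc.reverse ++ l.flatMap (fvStep k new) := by
  intro fuel
  induction fuel with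
  | zero =>
    intro l acc h
    have : l = [] := List.length_eq_zero_iff.mp (Nat.le_zero.mp h)
    subst this
    simp [PySem.Chars.replace.go]
  | succ n ih =>
    intro l acc h
    cases l with
    | nil => simp [PySem.Chars.replace.go]
    | cons c t =>
      simp only [PySem.Chars.replace.go]
      by_cases hc : c = k
      · subst hc
        have hpre : List.isPrefixOf [c] (c :: t) = true := by
          simp [List.isPrefixOf]
        rw [if_pos hpre]
        have hdrop : List.drop [c].length (c :: t) = t := rfl
        rw [hdrop, ih t (new.reverse ++ acc) (Nat.le_of_succ_le_succ (by simpa using h))]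
        simp [fvStep]
      · have hpre : List.isPrefixOf [k] (c :: t) = false := by
          simp [List.isPrefixOf]
          intro h'; exact absurd h'.symm hc
        rw [if_neg (by simp [hpre])]
        rw [ih t (c :: acc) (Nat.le_of_succ_le_succ (by simpa using h))]
        simp [fvStep, hc]

theorem replace_single (k : Char) (new s : List Char) :
    PySem.Chars.replace s [k] new = s.flatMap (fvStep k new) := by
  have hne : ([k] : List Char).isEmpty = false := rfl
  rw [PySem.Chars.replace, hne]
  simpa using replace_go_single k new s.length s [] (le_refl _)

-- replacing after a flatMap composes the flatMaps
theorem flatMap_replace (s : List Char) (f : Char → List Char) (k : Char) (new : List Char) :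
    PySem.Chars.replace (s.flatMap f) [k] new
      = s.flatMap (fun c => (f c).flatMap (fvStep k new)) := by
  rw [replace_single, List.flatMap_assoc]

-- the per-character map B realises
def fvMap (c : Char) : List Char :=
  if '0' ≤ c ∧ c ≤ '9' then fvCodes.getD (c.toNat - '0'.toNat) [c] else [c]

-- a non-digit char equals none of the ten digit literals → fvMap is the identity
theorem fvMap_default (c : Char)
    (h0 : ¬c = '0') (h1 : ¬c = '1') (h2 : ¬c = '2') (h3 : ¬c = '3') (h4 : ¬c = '4')
    (h5 : ¬c = '5') (h6 : ¬c = '6') (h7 : ¬c = '7') (h8 : ¬c = '8') (h9 : ¬c = '9') :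
    fvMap c = [c] := by
  have hn : ¬('0' ≤ c ∧ c ≤ '9') := by
    rintro ⟨hl, hr⟩
    have hl' : (48 : Nat) ≤ c.toNat := hl
    have hr' : c.toNat ≤ 57 := hr
    have hne : ∀ d : Char, c ≠ d → c.toNat ≠ d.toNat := by
      intro d hd he
      exact hd (Char.ext (UInt32.toNat_inj.mp he))
    have d0 : c.toNat ≠ 48 := hne _ h0
    have d1 : c.toNat ≠ 49 := hne _ h1
    have d2 : c.toNat ≠ 50 := hne _ h2
    have d3 : c.toNat ≠ 51 := hne _ h3
    have d4 : c.toNat ≠ 52 := hne _ h4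
    have d5 : c.toNat ≠ 53 := hne _ h5
    have d6 : c.toNat ≠ 54 := hne _ h6
    have d7 : c.toNat ≠ 55 := hne _ h7
    have d8 : c.toNat ≠ 56 := hne _ h8
    have d9 : c.toNat ≠ 57 := hne _ h9
    omega
  simp [fvMap, hn]

-- the composition of A's ten single-char replaces is the flatMap of B's per-character map
theorem pipeline_eq_flatMap (s : List Char) :
    (PySem.Chars.replace (PySem.Chars.replace (PySem.Chars.replace (PySem.Chars.replace
      (PySem.Chars.replace (PySem.Chars.replace (PySem.Chars.replace (PySem.Chars.replace
      (PySem.Chars.replace (PySem.Chars.replace s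
      ['0'] ['L', 'P']) ['1'] ['L', 'R']) ['2'] ['L', 'M']) ['3'] ['L', 'I'])
      ['4'] ['R', 'I']) ['5'] ['R', 'M']) ['6'] ['R', 'R']) ['7'] ['R', 'P'])
      ['8'] ['L', 'T']) ['9'] ['R', 'T'])
      = s.flatMap fvMap := by
  rw [replace_single '0' ['L', 'P'] s, flatMap_replace, flatMap_replace, flatMap_replace, flatMap_replace,
    flatMap_replace, flatMap_replace, flatMap_replace, flatMap_replace, flatMap_replace]
  refine List.flatMap_congr (fun c _ => ?_)
  by_cases h0 : c = '0'; · subst h0; decide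
  by_cases h1 : c = '1'; · subst h1; decide
  by_cases h2 : c = '2'; · subst h2; decide
  by_cases h3 : c = '3'; · subst h3; decide
  by_cases h4 : c = '4'; · subst h4; decide
  by_cases h5 : c = '5'; · subst h5; decide
  by_cases h6 : c = '6'; · subst h6; decide
  by_cases h7 : c = '7'; · subst h7; decide
  by_cases h8 : c = '8'; · subst h8; decide
  by_cases h9 : c = '9'; · subst h9; decide
  rw [fvMap_default c h0 h1 h2 h3 h4 h5 h6 h7 h8 h9]
  simp [fvStep, h0, h1, h2, h3, h4, h5, h6, h7, h8, h9]

-- B's accumulation loop is the same flatMap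
theorem fvBuild_eq_flatMap (s : List Char) : fvBuild s = s.flatMap fvMap := by
  induction s with
  | nil => rfl
  | cons c t ih => simp [fvBuild, fvMap, ih, List.flatMap_cons]

-- the two ports agree character-list-wise
theorem main_lists (finger : String) :
    (finger_value finger).toList = (finger_value_alt finger).toList := by
  have t0 : ("0" : String).toList = ['0'] := rfl
  have t1 : ("1" : String).toList = ['1'] := rfl
  have t2 : ("2" : String).toList = ['2'] := rfl
  have t3 : ("3" : String).toList = ['3'] := rfl
  have t4 : ("4" : String).toList = ['4'] := rfl
  have t5 : ("5" : String).toList = ['5'] := rfl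
  have t6 : ("6" : String).toList = ['6'] := rfl
  have t7 : ("7" : String).toList = ['7'] := rfl
  have t8 : ("8" : String).toList = ['8'] := rfl
  have t9 : ("9" : String).toList = ['9'] := rfl
  have tLP : ("LP" : String).toList = ['L','P'] := rfl
  have tLR : ("LR" : String).toList = ['L','R'] := rfl
  have tLM : ("LM" : String).toList = ['L','M'] := rfl
  have tLI : ("LI" : String).toList = ['L','I'] := rfl
  have tRI : ("RI" : String).toList = ['R','I'] := rfl
  have tRM : ("RM" : String).toList = ['R','M'] := rfl
  have tRR : ("RR" : String).toList = ['R','R'] := rfl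
  have tRP : ("RP" : String).toList = ['R','P'] := rfl
  have tLT : ("LT" : String).toList = ['L','T'] := rfl
  have tRT : ("RT" : String).toList = ['R','T'] := rfl
  simp only [finger_value, finger_value_alt, fvReplacements, List.foldl,
    PySem.Str.toList_strip, PySem.Str.toList_replace, String.toList_ofList,
    t0, t1, t2, t3, t4, t5, t6, t7, t8, t9,
    tLP, tLR, tLM, tLI, tRI, tRM, tRR, tRP, tLT, tRT]
  rw [pipeline_eq_flatMap, fvBuild_eq_flatMap]

-- ===== VERDICT (by name: the statement is the Claim_ definition above) =====
theorem finger_value_spec : Claim_equal_finger_value := by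
  intro finger _
  show finger_value finger = finger_value_alt finger
  exact String.toList_inj.mp (main_lists finger)
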